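-- pv_equiv track=rewrite | github.com/unitware/advent-of-code | 2018/6/assingment_6.py | is_inner_coords
-- ===== SOURCE A (Python) =====
-- def is_inner_coords(pos, points):
--     '''
--     >>> is_inner_coords((3, 4), parse_input(example_input()))
--     True
--     >>> is_inner_coords((1, 1), parse_input(example_input()))
--     False
--     '''
--     x, y = pos
--     leftmost = True
--     rightmost = True
--     highest = True
--     lowest = True
--
--     for px, py in points:
--         if px < x:
--             leftmost = False
--         elif px > x:
--             rightmost = False
--
--         if py < y:
--             lowest = False
--         elif py > y:
--             highest = False
--
--     return not (leftmost or rightmost or highest or lowest)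
-- ===== SOURCE B (Python) =====
-- def is_inner_coords(pos, points):
--     x, y = pos
--     return (any(px < x for px, py in points)
--             and any(px > x for px, py in points)
--             and any(py < y for px, py in points)
--             and any(py > y for px, py in points))
-- ===== Notes on version B (the rewrite author's own statement) =====
-- stated objective: idiomatic
-- what changed: Replaced the fused four-flag state-tracking loop with four independent any() existence checks joined by and.
import Mathlib
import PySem

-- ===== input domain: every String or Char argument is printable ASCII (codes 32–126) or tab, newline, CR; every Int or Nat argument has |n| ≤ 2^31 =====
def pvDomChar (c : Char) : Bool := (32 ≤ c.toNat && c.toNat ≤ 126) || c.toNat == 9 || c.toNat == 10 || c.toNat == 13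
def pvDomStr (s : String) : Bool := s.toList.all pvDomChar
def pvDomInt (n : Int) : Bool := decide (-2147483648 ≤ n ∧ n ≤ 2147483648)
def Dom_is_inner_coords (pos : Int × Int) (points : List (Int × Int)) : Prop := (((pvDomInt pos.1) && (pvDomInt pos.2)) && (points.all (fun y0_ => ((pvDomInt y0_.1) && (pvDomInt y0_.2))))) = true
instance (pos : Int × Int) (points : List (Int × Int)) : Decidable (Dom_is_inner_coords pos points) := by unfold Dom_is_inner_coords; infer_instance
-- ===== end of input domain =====

-- B: four independent any() existence checks instead of A's fused four-flag loop (idiomatic decomposition).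
-- ===== PORT A =====
def is_inner_coords (pos : Int × Int) (points : List (Int × Int)) : Bool :=
  let x := pos.1
  let y := pos.2
  let st := points.foldl (fun (s : Bool × Bool × Bool × Bool) p =>
    let (leftmost, rightmost, highest, lowest) := s
    let leftmost  := if p.1 < x then false else leftmost
    let rightmost := if p.1 < x then rightmost else if p.1 > x then false else rightmost
    let lowest    := if p.2 < y then false else lowest
    let highest   := if p.2 < y then highest else if p.2 > y then false else highest
    (leftmost, rightmost, highest, lowest)) (true, true, true, true)
  !(st.1 || st.2.1 || st.2.2.1 || st.2.2.2)

-- ===== PORT B =====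
def is_inner_coords_alt (pos : Int × Int) (points : List (Int × Int)) : Bool :=
  let x := pos.1
  let y := pos.2
  (points.any (fun p => p.1 < x)) &&
  (points.any (fun p => p.1 > x)) &&
  (points.any (fun p => p.2 < y)) &&
  (points.any (fun p => p.2 > y))

-- ===== PRECONDITION & SPEC =====
def Spec_is_inner_coords (pos : Int × Int) (points : List (Int × Int)) (out : Bool) : Prop := out = is_inner_coords_alt pos points
instance (pos : Int × Int) (points : List (Int × Int)) (out : Bool) : Decidable (Spec_is_inner_coords pos points out) := by unfold Spec_is_inner_coords; infer_instance

-- ===== CLAIM (what is proved, stated in full; the proofs are below) =====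
def Claim_equal_is_inner_coords : Prop := ∀ (pos : Int × Int) (points : List (Int × Int)), Dom_is_inner_coords pos points → Spec_is_inner_coords pos points (is_inner_coords pos points)

-- ===== LEMMAS AND PROOFS =====

-- ===== VERDICT (by name: the statement is the Claim_ definition above) =====
lemma inner_fold_inv (x y : Int) (points : List (Int × Int)) (l r h lo : Bool) :
    points.foldl (fun (s : Bool × Bool × Bool × Bool) p =>
      let (leftmost, rightmost, highest, lowest) := s
      let leftmost  := if p.1 < x then false else leftmost
      let rightmost := if p.1 < x then rightmost else if p.1 > x then false else rightmost
      let lowest    := if p.2 < y then false else lowest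
      let highest   := if p.2 < y then highest else if p.2 > y then false else highest
      (leftmost, rightmost, highest, lowest)) (l, r, h, lo)
    = (l && !(points.any (fun p => p.1 < x)),
       r && !(points.any (fun p => p.1 > x)),
       h && !(points.any (fun p => p.2 > y)),
       lo && !(points.any (fun p => p.2 < y))) := by
  induction points generalizing l r h lo with
  | nil => simp
  | cons p ps ih =>
    simp only [List.foldl_cons, List.any_cons, ih]
    by_cases h1 : p.1 < x <;> by_cases h2 : p.1 > x <;>
      by_cases h3 : p.2 < y <;> by_cases h4 : p.2 > y <;>
      first
      | (exfalso; omega)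
      | simp [h1, h2, h3, h4]

theorem is_inner_coords_spec : Claim_equal_is_inner_coords := by
  intro pos points _
  unfold Spec_is_inner_coords is_inner_coords is_inner_coords_alt
  simp only [inner_fold_inv]
  cases points.any (fun p => p.1 < pos.1) <;>
    cases points.any (fun p => p.1 > pos.1) <;>
    cases points.any (fun p => p.2 < pos.2) <;>
    cases points.any (fun p => p.2 > pos.2) <;> simp
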